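-- pv_equiv track=rewrite | github.com/theilmbh/NeuralTDA | neuraltda/simpComp.py | old_simplicialChainGroups
-- ===== SOURCE A (Python) =====
-- def union(a, b):
--     return list(set(a) | set(b))
--
-- def primaryFaces(Q):
--     """
--     Take a simplex and return its primary faces
--     These are the faces of one dimension less.
--
--     Parameters
--     ----------
--     Q : tuple
--         tuple of vertices defining a simplex
--
--     Returns
--     -------
--     L : list
--         list of simplices for the primary faces of Q
--     """
--
--     L = []
--     dim = len(Q)
--     Q = list(Q)
--     Q.extend(Q[: dim - 2])
--     for ind in range(dim):
--         face = Q[ind : ind + (dim - 1)]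
--         L.append(tuple(sorted(face)))
--     return L
--
-- def old_simplicialChainGroups(maxsimps):
--     """
--     Take a list of maximal simplices and
--     successively add faces until all generators
--     of the chain groups are present
--
--     Parameters
--     ----------
--     maxsimps : list of tuples
--         list of the maximal simplices in the complex
--
--     Returns
--     -------
--     E : list of lists
--         simplicial complex generators in each dimension
--     """
--
--     maxdim = max([len(s) for s in maxsimps])
--     Elen = maxdim + 2
--     E = [[] for ind in range(Elen)]
--     K = list(maxsimps)
--     while len(K) > 0:
--         Q = K.pop(0)
--         k = len(Q) - 1
--         if k < 0:
--             continue
--         L = primaryFaces(Q)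
--         K = union(K, L)
--         E[k] = union(E[k], L)
--         E[k + 1] = union(E[k + 1], {Q})
--     for k in range(Elen):
--         E[k] = sorted(E[k])
--     return E
-- ===== SOURCE B (Python) =====
-- def old_simplicialChainGroups(maxsimps):
--     maxdim = max(len(s) for s in maxsimps)
--     E = [set() for _ in range(maxdim + 2)]
--     for Q in maxsimps:
--         if len(Q) == 0:
--             continue
--         E[len(Q)].add(tuple(Q))
--         subs = {()}
--         for x in sorted(Q):
--             subs |= {s + (x,) for s in subs}
--         for s in subs:
--             if len(s) < len(Q):
--                 E[len(s)].add(s)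
--     return [sorted(e) for e in E]
-- ===== Notes on version B (the rewrite author's own statement) =====
-- stated objective: faster
-- what changed: A grows a worklist by repeated set-unions, re-deriving faces of faces one dimension at a time; B makes a single pass over the maximal simplices and enumerates each one's sorted sub-simplices once with a powerset fold into per-dimension sets, sorting each dimension at the end.
import Mathlib
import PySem

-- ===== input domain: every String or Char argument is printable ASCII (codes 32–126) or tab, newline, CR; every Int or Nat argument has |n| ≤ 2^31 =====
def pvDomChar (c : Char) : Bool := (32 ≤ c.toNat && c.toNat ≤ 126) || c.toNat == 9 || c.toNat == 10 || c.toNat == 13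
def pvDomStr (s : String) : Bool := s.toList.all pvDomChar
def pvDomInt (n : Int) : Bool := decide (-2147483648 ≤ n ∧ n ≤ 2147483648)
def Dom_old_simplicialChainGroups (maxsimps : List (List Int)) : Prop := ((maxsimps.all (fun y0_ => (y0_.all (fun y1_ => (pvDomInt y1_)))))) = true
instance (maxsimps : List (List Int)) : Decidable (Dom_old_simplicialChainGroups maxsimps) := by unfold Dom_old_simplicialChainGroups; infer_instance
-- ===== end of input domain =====

-- B replaces A's quadratic worklist of repeated set-unions by a single pass that, for each
-- maximal simplex, enumerates all sorted sub-simplices once into per-dimension sets (objective: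
-- faster, measured).

-- ===== PORT A =====
-- union(a, b) = list(set(a) | set(b))  (CPython's hash iteration order is not modelled; the
-- returned value of the whole function is sorted per dimension, so it does not depend on it)
def pvUnionA (a b : List (List Int)) : List (List Int) :=
  PySem.Set.union (PySem.Set.ofList a) b

-- primaryFaces(Q): Q.extend(Q[:dim-2]); faces = sorted windows Q[ind:ind+dim-1]
def primaryFaces (Q : List Int) : List (List Int) :=
  let dim := Q.length
  let Qe := Q ++ PySem.List.slice Q none (some ((dim : Int) - 2))
  (PySem.List.pyRange 0 (dim : Int) 1).foldl
    (fun L ind =>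
      L ++ [PySem.List.sorted (PySem.List.slice Qe (some ind) (some (ind + ((dim : Int) - 1)))) (fun x => x) false])
    []

-- termination measure for A's while loop
def pvWeight (Q : List Int) : Nat := (Q.length + 1).factorial
def pvMeasure (K : List (List Int)) : Nat := (K.map pvWeight).sum

theorem pvMeasure_nil : pvMeasure [] = 0 := rfl

theorem pvMeasure_cons (Q : List Int) (K : List (List Int)) :
    pvMeasure (Q :: K) = pvWeight Q + pvMeasure K := by
  simp [pvMeasure]

theorem pvMeasure_append (a b : List (List Int)) :
    pvMeasure (a ++ b) = pvMeasure a + pvMeasure b := by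
  simp [pvMeasure]

theorem pvMeasure_add_le (s : PySem.Set (List Int)) (x : List Int) :
    pvMeasure (PySem.Set.add s x) ≤ pvMeasure s + pvWeight x := by
  rw [PySem.Set.add_eq_ite]
  split
  · omega
  · rw [pvMeasure_append, pvMeasure_cons, pvMeasure_nil]; omega

theorem pvMeasure_foldl_add (t : List (List Int)) :
    ∀ s : PySem.Set (List Int), pvMeasure (t.foldl PySem.Set.add s) ≤ pvMeasure s + pvMeasure t := by
  induction t with
  | nil => intro s; simp [pvMeasure_nil]
  | cons x t ih =>
      intro s
      have h1 := ih (PySem.Set.add s x)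
      have h2 := pvMeasure_add_le s x
      rw [pvMeasure_cons]
      simp only [List.foldl_cons]
      omega

theorem pvMeasure_ofList_le (a : List (List Int)) :
    pvMeasure (PySem.Set.ofList a) ≤ pvMeasure a := by
  rw [PySem.Set.ofList_eq_foldl]
  have := pvMeasure_foldl_add a []
  simpa [pvMeasure_nil] using this

theorem pvMeasure_unionA_le (a b : List (List Int)) :
    pvMeasure (pvUnionA a b) ≤ pvMeasure a + pvMeasure b := by
  have h1 : pvMeasure (pvUnionA a b) ≤ pvMeasure (PySem.Set.ofList a) + pvMeasure b :=
    pvMeasure_foldl_add b (PySem.Set.ofList a)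
  have h2 := pvMeasure_ofList_le a
  omega

-- the ind-th face window is a permutation of Q with one index erased
theorem pvWindow_perm (Q : List Int) (n : Nat) (hn : n < Q.length) :
    (PySem.List.slice (Q ++ PySem.List.slice Q none (some ((Q.length : Int) - 2)))
        (some (n : Int)) (some ((n : Int) + ((Q.length : Int) - 1)))).Perm
      (Q.eraseIdx (if n = 0 then Q.length - 1 else n - 1)) := by
  by_cases h0 : n = 0
  · subst h0
    rw [if_pos rfl]
    have hcast : (0 : Nat) = ((0 : Nat) : Int) := rfl
    rw [show ((0:Nat) : Int) = (0:Int) from rfl]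
    rw [PySem.List.slice_zero_start]
    rw [show (0 : Int) + ((Q.length : Int) - 1) = ((Q.length - 1 : Nat) : Int) by omega]
    rw [PySem.List.slice_to_natCast]
    rw [List.take_append]
    rw [show Q.length - 1 - Q.length = 0 by omega]
    rw [List.take_zero, List.append_nil]
    rw [List.eraseIdx_eq_take_drop_succ]
    rw [show Q.length - 1 + 1 = Q.length by omega]
    rw [List.drop_length, List.append_nil]
  · have h1 : 1 ≤ n := by omega
    have hd : 2 ≤ Q.length := by omega
    rw [if_neg h0]
    rw [show ((Q.length : Int) - 2) = ((Q.length - 2 : Nat) : Int) by omega]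
    rw [PySem.List.slice_to_natCast]
    rw [show ((n : Int) + ((Q.length : Int) - 1)) = ((n + Q.length - 1 : Nat) : Int) by omega]
    rw [PySem.List.slice_natCast]
    rw [show n + Q.length - 1 - n = Q.length - 1 by omega]
    rw [List.drop_append_of_le_length (by omega)]
    rw [List.take_append]
    rw [List.take_of_length_le (by rw [List.length_drop]; omega)]
    rw [List.take_take]
    rw [List.length_drop]
    rw [show Q.length - 1 - (Q.length - n) = n - 1 by omega]
    rw [show min (n-1) (Q.length - 2) = n - 1 by omega]
    rw [List.eraseIdx_eq_take_drop_succ, show n - 1 + 1 = n by omega]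
    exact List.perm_append_comm

theorem mem_primaryFaces (Q S : List Int) :
    S ∈ primaryFaces Q ↔ ∃ j < Q.length, S = PySem.List.sorted (Q.eraseIdx j) (fun x => x) false := by
  unfold primaryFaces
  rw [PySem.List.foldl_append_singleton_eq_map, List.nil_append]
  rw [List.mem_map]
  constructor
  · rintro ⟨ind, hind, rfl⟩
    rw [PySem.List.mem_pyRange_one] at hind
    obtain ⟨hi0, hid⟩ := hind
    have hn : ind.toNat < Q.length := by omega
    refine ⟨if ind.toNat = 0 then Q.length - 1 else ind.toNat - 1, by split <;> omega, ?_⟩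
    have hperm := pvWindow_perm Q ind.toNat hn
    rw [Int.toNat_of_nonneg hi0] at hperm
    exact (PySem.List.sorted_eq_sorted_of_perm _ _ _ (fun a b h => h) hperm).symm ▸ rfl
  · rintro ⟨j, hj, rfl⟩
    by_cases hje : j = Q.length - 1
    · refine ⟨0, ?_, ?_⟩
      · rw [PySem.List.mem_pyRange_one]; omega
      · have hperm := pvWindow_perm Q 0 (by omega)
        rw [if_pos rfl] at hperm
        rw [show ((0:Nat):Int) = (0:Int) from rfl] at hperm
        have := PySem.List.sorted_eq_sorted_of_perm _ _ (fun x : Int => x) (fun a b h => h) hperm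
        rw [this, hje]
    · refine ⟨((j+1 : Nat) : Int), ?_, ?_⟩
      · rw [PySem.List.mem_pyRange_one]; constructor
        · positivity
        · omega
      · have hperm := pvWindow_perm Q (j+1) (by omega)
        rw [if_neg (by omega)] at hperm
        have := PySem.List.sorted_eq_sorted_of_perm _ _ (fun x : Int => x) (fun a b h => h) hperm
        rw [this]
        norm_num

theorem length_of_mem_primaryFaces {Q S : List Int} (h : S ∈ primaryFaces Q) :
    S.length = Q.length - 1 := by
  rcases (mem_primaryFaces Q S).1 h with ⟨j, hj, rfl⟩
  rw [PySem.List.length_sorted, List.length_eraseIdx_of_lt hj]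

theorem length_primaryFaces (Q : List Int) : (primaryFaces Q).length = Q.length := by
  unfold primaryFaces
  rw [PySem.List.foldl_append_singleton_eq_map]
  simp [PySem.List.length_pyRange_one]

theorem pvMeasure_primaryFaces_lt (Q : List Int) (hQ : Q ≠ []) :
    pvMeasure (primaryFaces Q) < pvWeight Q := by
  have hd : 1 ≤ Q.length := List.length_pos_iff.mpr hQ
  have hb : ∀ x ∈ (primaryFaces Q).map pvWeight, x ≤ Q.length.factorial := by
    intro x hx
    rcases List.mem_map.1 hx with ⟨S, hS, rfl⟩
    have hl := length_of_mem_primaryFaces hS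
    unfold pvWeight
    rw [hl]
    have : Q.length - 1 + 1 = Q.length := by omega
    rw [this]
  have := List.sum_le_card_nsmul ((primaryFaces Q).map pvWeight) (Q.length.factorial) hb
  have hlen : ((primaryFaces Q).map pvWeight).length = Q.length := by
    rw [List.length_map, length_primaryFaces]
  unfold pvMeasure pvWeight
  rw [Nat.factorial_succ]
  have hfac : 0 < Q.length.factorial := Nat.factorial_pos _
  calc ((primaryFaces Q).map pvWeight).sum
      ≤ ((primaryFaces Q).map pvWeight).length • Q.length.factorial := this
    _ = Q.length * Q.length.factorial := by rw [hlen, smul_eq_mul]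
    _ < (Q.length + 1) * Q.length.factorial :=
        (Nat.mul_lt_mul_right hfac).mpr (Nat.lt_succ_self _)

-- the while loop of A
def pvLoopA (K : List (List Int)) (E : List (List (List Int))) : List (List (List Int)) :=
  match K with
  | [] => E
  | Q :: K' =>
      let k : Int := (Q.length : Int) - 1
      if h : k < 0 then pvLoopA K' E
      else
        let L := primaryFaces Q
        let K2 := pvUnionA K' L
        let E1 := E.set k.toNat (pvUnionA (PySem.List.pyGetD E k []) L)
        let E2 := E1.set (k + 1).toNat (pvUnionA (PySem.List.pyGetD E1 (k + 1) []) [Q])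
        pvLoopA K2 E2
termination_by pvMeasure K
decreasing_by
  · rw [pvMeasure_cons]; have : 0 < pvWeight Q := Nat.factorial_pos _; omega
  · rw [pvMeasure_cons]
    have hQ : Q ≠ [] := by
      intro he; subst he; exact h (by show ((([] : List Int).length : Int) - 1) < 0; norm_num)
    have h1 := pvMeasure_unionA_le K' (primaryFaces Q)
    have h2 := pvMeasure_primaryFaces_lt Q hQ
    omega

def old_simplicialChainGroups (maxsimps : List (List Int)) : List (List (List Int)) :=
  match PySem.List.max? (maxsimps.map (fun s => s.length)) (fun x => x) with
  | none => []   -- max([]) raises ValueError: excluded by Pre_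
  | some maxdim =>
      let Elen := maxdim + 2
      let E0 : List (List (List Int)) := List.replicate Elen []
      let E := pvLoopA maxsimps E0
      (PySem.List.pyRange 0 (Elen : Int) 1).foldl
        (fun Ec k => Ec.set k.toNat (PySem.List.sorted (PySem.List.pyGetD Ec k []) (fun x => x) false)) E

-- ===== PORT B =====
def old_simplicialChainGroups_alt (maxsimps : List (List Int)) : List (List (List Int)) :=
  match PySem.List.max? (maxsimps.map (fun s => s.length)) (fun x => x) with
  | none => []   -- max of an empty generator raises ValueError: excluded by Pre_
  | some maxdim =>
      let E0 : List (List (List Int)) := List.replicate (maxdim + 2) PySem.Set.empty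
      let E := maxsimps.foldl
        (fun E Q =>
          if Q.length = 0 then E
          else
            let E1 := E.set Q.length (PySem.Set.add (E.getD Q.length []) Q)
            let subs := (PySem.List.sorted Q (fun x => x) false).foldl
              (fun subs x => PySem.Set.union subs (subs.map (fun s => s ++ [x])))
              (PySem.Set.ofList [([] : List Int)])
            subs.foldl
              (fun E s =>
                if s.length < Q.length then E.set s.length (PySem.Set.add (E.getD s.length []) s) else E)
              E1)
        E0
      E.map (fun e => PySem.List.sorted e (fun x => x) false)

-- ===== PRECONDITION & SPEC =====
-- Pre_ excludes only the empty list, on which both A and B raise ValueError (max of an empty sequence).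
def Pre_old_simplicialChainGroups (maxsimps : List (List Int)) : Prop := maxsimps ≠ []
instance (maxsimps : List (List Int)) : Decidable (Pre_old_simplicialChainGroups maxsimps) := by
  unfold Pre_old_simplicialChainGroups; infer_instance

def pvWitness_old_simplicialChainGroups : List (List Int) := [[1, 2], [2, 3]]

def Spec_old_simplicialChainGroups (maxsimps : List (List Int)) (out : List (List (List Int))) : Prop :=
  out = old_simplicialChainGroups_alt maxsimps
instance (maxsimps : List (List Int)) (out : List (List (List Int))) :
    Decidable (Spec_old_simplicialChainGroups maxsimps out) := by
  unfold Spec_old_simplicialChainGroups; infer_instance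

-- ===== CLAIM (what is proved, stated in full; the proofs are below) =====
def Claim_equal_old_simplicialChainGroups : Prop :=
  ∀ (maxsimps : List (List Int)), Dom_old_simplicialChainGroups maxsimps →
    Pre_old_simplicialChainGroups maxsimps →
    Spec_old_simplicialChainGroups maxsimps (old_simplicialChainGroups maxsimps)

-- ===== LEMMAS AND PROOFS =====

-- shared shorthand (proofs only)
def pvSortI (xs : List Int) : List Int := PySem.List.sorted xs (fun x => x) false

-- the contribution of one worklist simplex Q to dimension k
def pvContrib (Q : List Int) (k : Nat) (S : List Int) : Prop :=
  (S = Q ∧ k = Q.length) ∨ (S.Sublist (pvSortI Q) ∧ S.length = k ∧ k < Q.length)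

-- sorted lists: subpermutation implies sublist
theorem pvSorted_subperm_sublist (T : List Int) : ∀ S : List Int, S.Pairwise (· ≤ ·) → T.Pairwise (· ≤ ·) →
    S.Subperm T → S.Sublist T := by
  induction T with
  | nil => intro S _ _ h; rw [List.subperm_nil] at h; subst h; exact List.Sublist.refl _
  | cons b T' ih =>
      intro S hS hT h
      match S with
      | [] => exact List.nil_sublist _
      | a :: S' =>
          by_cases hab : a = b
          · subst hab
            exact List.Sublist.cons₂ _ (ih S' hS.of_cons hT.of_cons ((List.subperm_cons a).mp h))
          · have hbS : b ∉ a :: S' := by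
              intro hmem
              rcases List.mem_cons.1 hmem with h1 | h1
              · exact hab h1.symm
              · have h2 : a ≤ b := (List.pairwise_cons.1 hS).1 b h1
                have h3 : b ≤ a := by
                  have ha : a ∈ b :: T' := h.subset (List.mem_cons_self)
                  rcases List.mem_cons.1 ha with h4 | h4
                  · exact absurd h4 hab
                  · exact (List.pairwise_cons.1 hT).1 a h4
                exact hab (le_antisymm h2 h3)
            have hsub : (a :: S').Subperm T' := by
              rw [List.subperm_ext_iff] at h ⊢
              intro x hx
              have hcount := h x hx
              have hxb : x ≠ b := fun he => hbS (he ▸ hx)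
              have hbx : ¬ (b = x) := fun he => hxb he.symm
              simpa [List.count_cons, hbx] using hcount
            exact List.Sublist.cons _ (ih (a :: S') hS hT.of_cons hsub)

theorem pvSortI_pairwise (xs : List Int) : (pvSortI xs).Pairwise (· ≤ ·) :=
  PySem.List.sorted_pairwise xs (fun x => x)

theorem pvSortI_sublist {m l : List Int} (h : m.Subperm l) : (pvSortI m).Sublist (pvSortI l) := by
  apply pvSorted_subperm_sublist _ _ (pvSortI_pairwise m) (pvSortI_pairwise l)
  exact ((PySem.List.sorted_perm m (fun x => x) false).subperm.trans h).trans
    (PySem.List.sorted_perm l (fun x => x) false).symm.subperm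

-- a strictly shorter sublist omits some index
theorem pvSublist_eraseIdx (T : List Int) : ∀ S : List Int, S.Sublist T → S.length < T.length →
    ∃ i < T.length, S.Sublist (T.eraseIdx i) := by
  induction T with
  | nil => intro S h hl; simp at hl
  | cons t T' ih =>
      intro S h hl
      rcases List.sublist_cons_iff.mp h with h1 | ⟨r, rfl, hr⟩
      · exact ⟨0, by simp, by simpa using h1⟩
      · have hlr : r.length < T'.length := by simpa using hl
        rcases ih r hr hlr with ⟨i, hi, hsub⟩
        refine ⟨i + 1, by simp; omega, ?_⟩
        rw [List.eraseIdx_cons_succ]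
        exact List.Sublist.cons₂ _ hsub

-- faces are sorted, and sortI-idempotent
theorem pvFace_sorted {Q F : List Int} (h : F ∈ primaryFaces Q) : pvSortI F = F := by
  rcases (mem_primaryFaces Q F).1 h with ⟨j, hj, rfl⟩
  exact PySem.List.sorted_sorted (Q.eraseIdx j) (fun x => x)

theorem pvFace_sublist_sortQ {Q F : List Int} (h : F ∈ primaryFaces Q) :
    F.Sublist (pvSortI Q) := by
  rcases (mem_primaryFaces Q F).1 h with ⟨j, hj, rfl⟩
  exact pvSortI_sublist (List.eraseIdx_sublist Q j).subperm

theorem pvEraseIdx_sorted_mem_primaryFaces (Q : List Int) (i : Nat) (hi : i < (pvSortI Q).length) :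
    (pvSortI Q).eraseIdx i ∈ primaryFaces Q := by
  have hperm : (pvSortI Q).Perm Q := PySem.List.sorted_perm Q (fun x => x) false
  have hmem : (pvSortI Q)[i] ∈ Q := hperm.subset (List.getElem_mem hi)
  rcases List.mem_iff_getElem.1 hmem with ⟨j, hj, hval⟩
  rw [mem_primaryFaces]
  refine ⟨j, hj, ?_⟩
  have e1 : ((pvSortI Q).eraseIdx i).Perm ((pvSortI Q).erase ((pvSortI Q)[i])) :=
    (List.erase_getElem hi).symm
  have e2 : ((pvSortI Q).erase ((pvSortI Q)[i])).Perm (Q.erase ((pvSortI Q)[i])) := hperm.erase _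
  have e3 : (Q.erase ((pvSortI Q)[i])).Perm (Q.eraseIdx j) := by
    rw [← hval]; exact List.erase_getElem hj
  have hp1 : ((pvSortI Q).eraseIdx i).Perm (Q.eraseIdx j) := e1.trans (e2.trans e3)
  have hpw : ((pvSortI Q).eraseIdx i).Pairwise (· ≤ ·) :=
    (pvSortI_pairwise Q).sublist (List.eraseIdx_sublist _ _)
  have hs : pvSortI ((pvSortI Q).eraseIdx i) = pvSortI (Q.eraseIdx j) :=
    PySem.List.sorted_eq_sorted_of_perm _ _ _ (fun a b h => h) hp1
  have hself : pvSortI ((pvSortI Q).eraseIdx i) = (pvSortI Q).eraseIdx i :=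
    PySem.List.sorted_eq_self_of_pairwise _ _ hpw
  show (pvSortI Q).eraseIdx i = pvSortI (Q.eraseIdx j)
  rw [← hs, hself]

-- key recursion step: the faces of Q together with their own descendants are exactly
-- the proper sorted sub-simplices of Q
theorem pvContrib_step (Q : List Int) (hQ : Q ≠ []) (k : Nat) (S : List Int) :
    ((S ∈ primaryFaces Q ∧ k = Q.length - 1) ∨ (∃ F ∈ primaryFaces Q, F ≠ [] ∧ pvContrib F k S)) ↔
      (S.Sublist (pvSortI Q) ∧ S.length = k ∧ k < Q.length) := by
  have hd : 1 ≤ Q.length := List.length_pos_of_ne_nil hQ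
  have hTlen : (pvSortI Q).length = Q.length := PySem.List.length_sorted Q (fun x => x) false
  constructor
  · rintro (⟨hSL, hk⟩ | ⟨F, hF, hFne, hc⟩)
    · refine ⟨pvFace_sublist_sortQ hSL, ?_, by omega⟩
      rw [length_of_mem_primaryFaces hSL, hk]
    · have hFlen := length_of_mem_primaryFaces hF
      have hFsub := pvFace_sublist_sortQ hF
      rcases hc with ⟨rfl, hk⟩ | ⟨hsub, hlen, hk⟩
      · exact ⟨hFsub, hk.symm, by omega⟩
      · refine ⟨((pvFace_sorted hF) ▸ hsub).trans hFsub, hlen, by omega⟩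
  · rintro ⟨hsub, hlen, hk⟩
    have hlt : S.length < (pvSortI Q).length := by omega
    rcases pvSublist_eraseIdx _ _ hsub hlt with ⟨i, hi, hSi⟩
    have hFmem := pvEraseIdx_sorted_mem_primaryFaces Q i hi
    have hFlen : ((pvSortI Q).eraseIdx i).length = Q.length - 1 :=
      length_of_mem_primaryFaces hFmem
    by_cases hSF : S = (pvSortI Q).eraseIdx i
    · left
      exact ⟨hSF ▸ hFmem, by rw [← hlen, hSF, hFlen]⟩
    · right
      have hSlt : S.length < ((pvSortI Q).eraseIdx i).length :=
        lt_of_le_of_ne hSi.length_le (fun he => hSF (hSi.eq_of_length he))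
      refine ⟨(pvSortI Q).eraseIdx i, hFmem, ?_, Or.inr ⟨?_, hlen, ?_⟩⟩
      · intro he; rw [he] at hSlt; simp at hSlt
      · rw [pvFace_sorted hFmem]; exact hSi
      · omega

-- A's loop: length, nodup, membership
theorem pvLoopA_length (K : List (List Int)) (E : List (List (List Int))) :
    (pvLoopA K E).length = E.length := by
  induction K, E using pvLoopA.induct with
  | case1 E => rw [pvLoopA]
  | case2 E Q K' k h ih => rw [pvLoopA, dif_pos h]; exact ih
  | case3 E Q K' k h L K2 E1 E2 ih =>
      rw [pvLoopA, dif_neg h]; rw [ih]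
      show ((E.set k.toNat (pvUnionA (PySem.List.pyGetD E k []) L)).set (k + 1).toNat
        (pvUnionA (PySem.List.pyGetD (E.set k.toNat (pvUnionA (PySem.List.pyGetD E k []) L)) (k + 1) []) [Q])).length = E.length
      simp [List.length_set]

theorem pvGetD_set {α : Type} (E : List α) (i k : Nat) (v d : α) :
    (E.set i v).getD k d = if k = i ∧ i < E.length then v else E.getD k d := by
  rw [List.getD_eq_getElem?_getD, List.getD_eq_getElem?_getD, List.getElem?_set]
  by_cases hk : k = i
  · subst hk
    by_cases hlt : k < E.length
    · rw [if_pos rfl, if_pos hlt, if_pos ⟨rfl, hlt⟩]; rfl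
    · rw [if_pos rfl, if_neg hlt, if_neg (by tauto), List.getElem?_eq_none (by omega)]
  · rw [if_neg (fun he => hk he.symm), if_neg (by tauto)]

theorem pvMem_unionA (a b : List (List Int)) (y : List Int) :
    y ∈ pvUnionA a b ↔ y ∈ a ∨ y ∈ b := by
  unfold pvUnionA
  rw [PySem.Set.mem_union, PySem.Set.mem_ofList]

theorem pvNodup_unionA (a b : List (List Int)) : (pvUnionA a b).Nodup :=
  PySem.Set.nodup_union _ _ (PySem.Set.nodup_ofList a)

theorem pvLoopA_nodup (K : List (List Int)) (E : List (List (List Int))) :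
    (∀ k : Nat, (E.getD k []).Nodup) → ∀ k : Nat, ((pvLoopA K E).getD k []).Nodup := by
  induction K, E using pvLoopA.induct with
  | case1 E => intro hE k; rw [pvLoopA]; exact hE k
  | case2 E Q K' k h ih => intro hE kk; rw [pvLoopA, dif_pos h]; exact ih hE kk
  | case3 E Q K' k h L K2 E1 E2 ih =>
      intro hE kk
      rw [pvLoopA, dif_neg h]
      apply ih
      intro k'
      show (((E.set k.toNat (pvUnionA (PySem.List.pyGetD E k []) L)).set (k + 1).toNat
        (pvUnionA (PySem.List.pyGetD E1 (k + 1) []) [Q])).getD k' []).Nodup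
      rw [pvGetD_set]
      split_ifs with h1
      · exact pvNodup_unionA _ _
      · rw [pvGetD_set]
        split_ifs with h2
        · exact pvNodup_unionA _ _
        · exact hE k'

theorem pvLoopA_mem (K : List (List Int)) (E : List (List (List Int))) :
    (∀ Q ∈ K, Q.length < E.length) → ∀ (kk : Nat) (S : List Int),
      (S ∈ (pvLoopA K E).getD kk [] ↔
        S ∈ E.getD kk [] ∨ ∃ Q ∈ K, Q ≠ [] ∧ pvContrib Q kk S) := by
  induction K, E using pvLoopA.induct with
  | case1 E => intro _ kk S; rw [pvLoopA]; simp
  | case2 E Q K' k h ih =>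
      intro hK kk S
      have hQ0 : Q = [] := by
        have hl : Q.length = 0 := by
          by_contra hc
          exact absurd (show ((Q.length : Int) - 1) < 0 from h) (by omega)
        exact List.length_eq_zero_iff.mp hl
      rw [pvLoopA, dif_pos h]
      rw [ih (fun Q' hQ' => hK Q' (List.mem_cons_of_mem _ hQ')) kk S]
      subst hQ0
      simp only [List.exists_mem_cons_iff]
      tauto
  | case3 E Q K' k h L K2 E1 E2 ih =>
      intro hK kk S
      have hd : 1 ≤ Q.length := by
        by_contra hc
        exact h (show ((Q.length : Int) - 1) < 0 by omega)
      have hQne : Q ≠ [] := by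
        intro he; rw [he] at hd; simp at hd
      have hm2 : Q.length < E.length := hK Q List.mem_cons_self
      have hm1 : Q.length - 1 < E.length := by omega
      have hk1 : k.toNat = Q.length - 1 := by
        show ((Q.length : Int) - 1).toNat = _; omega
      have hk2 : (k + 1).toNat = Q.length := by
        show ((Q.length : Int) - 1 + 1).toNat = _; omega
      have hg1 : PySem.List.pyGetD E k [] = E.getD (Q.length - 1) [] := by
        show PySem.List.pyGetD E ((Q.length : Int) - 1) [] = _
        rw [show ((Q.length : Int) - 1) = ((Q.length - 1 : Nat) : Int) by omega,
          PySem.List.pyGetD_natCast]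
      have hE1 : E1 = E.set (Q.length - 1) (pvUnionA (E.getD (Q.length - 1) []) (primaryFaces Q)) := by
        show E.set k.toNat (pvUnionA (PySem.List.pyGetD E k []) L) = _
        rw [hk1, hg1]
      have hE1len : E1.length = E.length := by rw [hE1]; simp
      have hg2 : PySem.List.pyGetD E1 (k + 1) [] = E1.getD Q.length [] := by
        show PySem.List.pyGetD E1 ((Q.length : Int) - 1 + 1) [] = _
        rw [show ((Q.length : Int) - 1 + 1) = ((Q.length : Nat) : Int) by omega,
          PySem.List.pyGetD_natCast]
      have hE1get : E1.getD Q.length [] = E.getD Q.length [] := by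
        rw [hE1, pvGetD_set, if_neg (by omega)]
      have hE2 : E2 = E1.set Q.length (pvUnionA (E.getD Q.length []) [Q]) := by
        show E1.set (k + 1).toNat (pvUnionA (PySem.List.pyGetD E1 (k + 1) []) [Q]) = _
        rw [hk2, hg2, hE1get]
      have hE2len : E2.length = E.length := by rw [hE2]; simp [hE1len]
      have hK2 : ∀ Q' ∈ K2, Q'.length < E2.length := by
        intro Q' hQ'
        rw [hE2len]
        rcases (pvMem_unionA K' (primaryFaces Q) Q').1 hQ' with h1 | h1
        · exact hK Q' (List.mem_cons_of_mem _ h1)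
        · rw [length_of_mem_primaryFaces h1]; omega
      rw [pvLoopA, dif_neg h]
      rw [ih hK2 kk S]
      have hmemE2 : S ∈ E2.getD kk [] ↔
          S ∈ E.getD kk [] ∨ (kk = Q.length ∧ S = Q) ∨ (kk = Q.length - 1 ∧ S ∈ primaryFaces Q) := by
        rw [hE2, pvGetD_set]
        by_cases hkQ : kk = Q.length
        · rw [if_pos ⟨hkQ, by omega⟩, pvMem_unionA]
          subst hkQ
          simp only [List.mem_singleton]
          have hne : ¬ (Q.length = Q.length - 1) := by omega
          constructor
          · rintro (h1 | h1)
            · exact Or.inl h1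
            · exact Or.inr (Or.inl ⟨by trivial, h1⟩)
          · rintro (h1 | ⟨_, h1⟩ | ⟨h1, _⟩)
            · exact Or.inl h1
            · exact Or.inr h1
            · exact absurd h1 hne
        · rw [if_neg (by tauto), hE1, pvGetD_set]
          by_cases hkm : kk = Q.length - 1
          · rw [if_pos ⟨hkm, hm1⟩, pvMem_unionA]
            subst hkm
            constructor
            · rintro (h1 | h1)
              · exact Or.inl h1
              · exact Or.inr (Or.inr ⟨by trivial, h1⟩)
            · rintro (h1 | ⟨h1, _⟩ | ⟨_, h1⟩)
              · exact Or.inl h1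
              · omega
              · exact Or.inr h1
          · rw [if_neg (by tauto)]
            constructor
            · exact Or.inl
            · rintro (h1 | ⟨h1, _⟩ | ⟨h1, _⟩)
              · exact h1
              · omega
              · omega
      have hsplit : (∃ Q' ∈ K2, Q' ≠ [] ∧ pvContrib Q' kk S) ↔
          (∃ Q' ∈ K', Q' ≠ [] ∧ pvContrib Q' kk S) ∨
            (∃ F ∈ primaryFaces Q, F ≠ [] ∧ pvContrib F kk S) := by
        constructor
        · rintro ⟨Q', hm, hp⟩
          rcases (pvMem_unionA K' (primaryFaces Q) Q').1 hm with h1 | h1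
          · exact Or.inl ⟨Q', h1, hp⟩
          · exact Or.inr ⟨Q', h1, hp⟩
        · rintro (⟨Q', hm, hp⟩ | ⟨F, hm, hp⟩)
          · exact ⟨Q', (pvMem_unionA K' (primaryFaces Q) Q').2 (Or.inl hm), hp⟩
          · exact ⟨F, (pvMem_unionA K' (primaryFaces Q) F).2 (Or.inr hm), hp⟩
      have hstep := pvContrib_step Q hQne kk S
      rw [hmemE2, hsplit]
      simp only [List.exists_mem_cons_iff]
      show _ ↔ _ ∨ (Q ≠ [] ∧ pvContrib Q kk S) ∨ _
      simp only [pvContrib] at *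
      constructor
      · rintro ((h1 | ⟨h1, h2⟩ | ⟨h1, h2⟩) | hC | hC)
        · exact Or.inl h1
        · exact Or.inr (Or.inl ⟨hQne, Or.inl ⟨h2, h1⟩⟩)
        · exact Or.inr (Or.inl ⟨hQne, Or.inr (hstep.1 (Or.inl ⟨h2, h1⟩))⟩)
        · exact Or.inr (Or.inr hC)
        · exact Or.inr (Or.inl ⟨hQne, Or.inr (hstep.1 (Or.inr hC))⟩)
      · rintro (h1 | ⟨_, hc | hc⟩ | hC)
        · exact Or.inl (Or.inl h1)
        · exact Or.inl (Or.inr (Or.inl ⟨hc.2, hc.1⟩))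
        · rcases hstep.2 hc with ⟨hL, hk⟩ | hC2
          · exact Or.inl (Or.inr (Or.inr ⟨hk, hL⟩))
          · exact Or.inr (Or.inr hC2)
        · exact Or.inr (Or.inl hC)

-- B's inner powerset fold
theorem pvSubs_fold_mem (xs : List Int) :
    ∀ (acc : PySem.Set (List Int)) (s : List Int),
      (s ∈ xs.foldl (fun subs x => PySem.Set.union subs (subs.map (fun t => t ++ [x]))) acc ↔
        ∃ t ∈ acc, ∃ u, u.Sublist xs ∧ s = t ++ u) := by
  induction xs with
  | nil =>
      intro acc s
      simp [List.sublist_nil]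
  | cons x xs ih =>
      intro acc s
      rw [List.foldl_cons, ih]
      constructor
      · rintro ⟨t, ht, u, hu, rfl⟩
        rcases (PySem.Set.mem_union _ _ t).1 ht with h1 | h1
        · exact ⟨t, h1, u, List.Sublist.cons _ hu, rfl⟩
        · rcases List.mem_map.1 h1 with ⟨t0, ht0, rfl⟩
          exact ⟨t0, ht0, x :: u, List.Sublist.cons₂ _ hu, by simp⟩
      · rintro ⟨t, ht, u, hu, rfl⟩
        rcases List.sublist_cons_iff.1 hu with h1 | ⟨r, rfl, hr⟩
        · exact ⟨t, (PySem.Set.mem_union _ _ t).2 (Or.inl ht), u, h1, rfl⟩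
        · exact ⟨t ++ [x], (PySem.Set.mem_union _ _ _).2 (Or.inr (List.mem_map.2 ⟨t, ht, rfl⟩)),
            r, hr, by simp⟩

theorem pvSubs_mem (xs : List Int) (s : List Int) :
    s ∈ xs.foldl (fun subs x => PySem.Set.union subs (subs.map (fun t => t ++ [x])))
        (PySem.Set.ofList [([] : List Int)]) ↔ s.Sublist xs := by
  rw [pvSubs_fold_mem]
  constructor
  · rintro ⟨t, ht, u, hu, rfl⟩
    have : t = [] := by simpa [PySem.Set.ofList] using ht
    subst this
    simpa using hu
  · intro h
    exact ⟨[], by simp [PySem.Set.ofList], s, h, by simp⟩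

-- B's per-simplex inner fold over the collected sub-simplices
theorem pvInnerB_length (Q : List Int) (subsl : List (List Int)) :
    ∀ E : List (List (List Int)),
      (subsl.foldl
        (fun E s =>
          if s.length < Q.length then E.set s.length (PySem.Set.add (E.getD s.length []) s) else E)
        E).length = E.length := by
  induction subsl with
  | nil => intro E; rfl
  | cons s0 rest ih =>
      intro E
      rw [List.foldl_cons]
      split
      · rw [ih]; simp
      · rw [ih]

theorem pvInnerB_nodup (Q : List Int) (subsl : List (List Int)) :
    ∀ E : List (List (List Int)), (∀ k : Nat, (E.getD k []).Nodup) → ∀ k : Nat,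
      (((subsl.foldl
        (fun E s =>
          if s.length < Q.length then E.set s.length (PySem.Set.add (E.getD s.length []) s) else E)
        E)).getD k []).Nodup := by
  induction subsl with
  | nil => intro E hE k; exact hE k
  | cons s0 rest ih =>
      intro E hE k
      rw [List.foldl_cons]
      split
      · apply ih
        intro k'
        rw [pvGetD_set]
        split_ifs with h1
        · exact PySem.Set.nodup_add _ _ (hE s0.length)
        · exact hE k'
      · exact ih E hE k

theorem pvInnerB_mem (Q : List Int) (subsl : List (List Int)) :
    ∀ E : List (List (List Int)), Q.length ≤ E.length → ∀ (kk : Nat) (S : List Int),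
      (S ∈ ((subsl.foldl
        (fun E s =>
          if s.length < Q.length then E.set s.length (PySem.Set.add (E.getD s.length []) s) else E)
        E)).getD kk [] ↔
        S ∈ E.getD kk [] ∨ (S ∈ subsl ∧ S.length = kk ∧ kk < Q.length)) := by
  induction subsl with
  | nil => intro E _ kk S; simp
  | cons s0 rest ih =>
      intro E hQE' kk S
      rw [List.foldl_cons]
      by_cases hlt : s0.length < Q.length
      · rw [if_pos hlt]
        rw [ih _ (by simpa using hQE') kk S]
        rw [pvGetD_set]
        by_cases hk0 : kk = s0.length
        · rw [if_pos ⟨hk0, by omega⟩, PySem.Set.mem_add]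
          subst hk0
          constructor
          · rintro ((h1 | h1) | h1)
            · exact Or.inl h1
            · exact Or.inr ⟨by rw [h1]; exact List.mem_cons_self, by rw [h1], hlt⟩
            · exact Or.inr ⟨List.mem_cons_of_mem _ h1.1, h1.2.1, h1.2.2⟩
          · rintro (h1 | ⟨h1, h2, h3⟩)
            · exact Or.inl (Or.inl h1)
            · rcases List.mem_cons.1 h1 with h4 | h4
              · exact Or.inl (Or.inr h4)
              · exact Or.inr ⟨h4, h2, h3⟩
        · rw [if_neg (by tauto)]
          constructor
          · rintro (h1 | h1)
            · exact Or.inl h1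
            · exact Or.inr ⟨List.mem_cons_of_mem _ h1.1, h1.2.1, h1.2.2⟩
          · rintro (h1 | ⟨h1, h2, h3⟩)
            · exact Or.inl h1
            · rcases List.mem_cons.1 h1 with h4 | h4
              · exfalso; apply hk0; rw [← h2, h4]
              · exact Or.inr ⟨h4, h2, h3⟩
      · rw [if_neg hlt]
        rw [ih E hQE' kk S]
        constructor
        · rintro (h1 | h1)
          · exact Or.inl h1
          · exact Or.inr ⟨List.mem_cons_of_mem _ h1.1, h1.2.1, h1.2.2⟩
        · rintro (h1 | ⟨h1, h2, h3⟩)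
          · exact Or.inl h1
          · rcases List.mem_cons.1 h1 with h4 | h4
            · exact absurd h3 (by rw [h4] at h2; omega)
            · exact Or.inr ⟨h4, h2, h3⟩

-- B's fold over maxsimps: length, nodup, membership
theorem pvLoopB_length (ms : List (List Int)) :
    ∀ E : List (List (List Int)),
    (ms.foldl
      (fun E Q =>
        if Q.length = 0 then E
        else
          let E1 := E.set Q.length (PySem.Set.add (E.getD Q.length []) Q)
          let subs := (PySem.List.sorted Q (fun x => x) false).foldl
            (fun subs x => PySem.Set.union subs (subs.map (fun s => s ++ [x])))
            (PySem.Set.ofList [([] : List Int)])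
          subs.foldl
            (fun E s =>
              if s.length < Q.length then E.set s.length (PySem.Set.add (E.getD s.length []) s) else E)
            E1)
      E).length = E.length := by
  induction ms with
  | nil => intro E; rfl
  | cons Q ms' ih =>
      intro E
      rw [List.foldl_cons]
      rw [ih]
      by_cases h0 : Q.length = 0
      · rw [if_pos h0]
      · rw [if_neg h0]
        simp only []
        rw [pvInnerB_length]
        simp

theorem pvLoopB_nodup (ms : List (List Int)) :
    ∀ E : List (List (List Int)), (∀ k : Nat, (E.getD k []).Nodup) → ∀ k : Nat,
    ((ms.foldl
      (fun E Q =>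
        if Q.length = 0 then E
        else
          let E1 := E.set Q.length (PySem.Set.add (E.getD Q.length []) Q)
          let subs := (PySem.List.sorted Q (fun x => x) false).foldl
            (fun subs x => PySem.Set.union subs (subs.map (fun s => s ++ [x])))
            (PySem.Set.ofList [([] : List Int)])
          subs.foldl
            (fun E s =>
              if s.length < Q.length then E.set s.length (PySem.Set.add (E.getD s.length []) s) else E)
            E1)
      E).getD k []).Nodup := by
  induction ms with
  | nil => intro E hE k; exact hE k
  | cons Q ms' ih =>
      intro E hE k
      rw [List.foldl_cons]
      by_cases h0 : Q.length = 0
      · rw [if_pos h0]; exact ih E hE k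
      · rw [if_neg h0]
        simp only []
        apply ih
        apply pvInnerB_nodup
        intro k'
        rw [pvGetD_set]
        split_ifs with h1
        · exact PySem.Set.nodup_add _ _ (hE Q.length)
        · exact hE k'

theorem pvLoopB_mem (ms : List (List Int)) :
    ∀ E : List (List (List Int)), (∀ Q ∈ ms, Q.length < E.length) → ∀ (kk : Nat) (S : List Int),
    (S ∈ (ms.foldl
      (fun E Q =>
        if Q.length = 0 then E
        else
          let E1 := E.set Q.length (PySem.Set.add (E.getD Q.length []) Q)
          let subs := (PySem.List.sorted Q (fun x => x) false).foldl
            (fun subs x => PySem.Set.union subs (subs.map (fun s => s ++ [x])))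
            (PySem.Set.ofList [([] : List Int)])
          subs.foldl
            (fun E s =>
              if s.length < Q.length then E.set s.length (PySem.Set.add (E.getD s.length []) s) else E)
            E1)
      E).getD kk [] ↔
      S ∈ E.getD kk [] ∨ ∃ Q ∈ ms, Q ≠ [] ∧ pvContrib Q kk S) := by
  induction ms with
  | nil => intro E _ kk S; simp
  | cons Q ms' ih =>
      intro E hE kk S
      rw [List.foldl_cons]
      by_cases h0 : Q.length = 0
      · rw [if_pos h0]
        rw [ih E (fun Q' h => hE Q' (List.mem_cons_of_mem _ h)) kk S]
        have hQ0 : Q = [] := List.length_eq_zero_iff.mp h0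
        subst hQ0
        simp only [List.exists_mem_cons_iff]
        tauto
      · rw [if_neg h0]
        simp only []
        have hQne : Q ≠ [] := fun he => h0 (by rw [he]; rfl)
        have hm2 : Q.length < E.length := hE Q List.mem_cons_self
        have hE1len : (E.set Q.length (PySem.Set.add (E.getD Q.length []) Q)).length = E.length := by
          simp
        have hIn := pvInnerB_length Q
          ((PySem.List.sorted Q (fun x => x) false).foldl
            (fun subs x => PySem.Set.union subs (subs.map (fun s => s ++ [x])))
            (PySem.Set.ofList [([] : List Int)]))
          (E.set Q.length (PySem.Set.add (E.getD Q.length []) Q))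
        rw [ih _ (by intro Q' h; rw [hIn, hE1len]; exact hE Q' (List.mem_cons_of_mem _ h)) kk S]
        rw [pvInnerB_mem Q _ _ (by rw [hE1len]; omega) kk S]
        rw [pvSubs_mem]
        rw [pvGetD_set]
        simp only [List.exists_mem_cons_iff, pvContrib, pvSortI]
        by_cases hkQ : kk = Q.length
        · rw [if_pos ⟨hkQ, hm2⟩, PySem.Set.mem_add]
          subst hkQ
          have hff : ¬ Q.length < Q.length := by omega
          constructor
          · rintro (((h1 | h1) | ⟨_, _, h3⟩) | hC)
            · exact Or.inl h1
            · exact Or.inr (Or.inl ⟨hQne, Or.inl ⟨h1, rfl⟩⟩)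
            · exact absurd h3 hff
            · exact Or.inr (Or.inr hC)
          · rintro (h1 | ⟨_, ⟨h1, _⟩ | ⟨_, _, h3⟩⟩ | hC)
            · exact Or.inl (Or.inl (Or.inl h1))
            · exact Or.inl (Or.inl (Or.inr h1))
            · exact absurd h3 hff
            · exact Or.inr hC
        · rw [if_neg (by tauto)]
          constructor
          · rintro ((h1 | ⟨h1, h2, h3⟩) | hC)
            · exact Or.inl h1
            · exact Or.inr (Or.inl ⟨hQne, Or.inr ⟨h1, h2, h3⟩⟩)
            · exact Or.inr (Or.inr hC)
          · rintro (h1 | ⟨_, ⟨_, h2⟩ | ⟨h1, h2, h3⟩⟩ | hC)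
            · exact Or.inl (Or.inl h1)
            · exact absurd h2 hkQ
            · exact Or.inl (Or.inr ⟨h1, h2, h3⟩)
            · exact Or.inr hC

-- A's trailing in-place sort loop is a map
theorem pvFoldSet_map (g : List (List Int) → List (List Int)) :
    ∀ (n : Nat) (E : List (List (List Int))), n ≤ E.length →
      (PySem.List.pyRange 0 (n : Int) 1).foldl
        (fun Ec k => Ec.set k.toNat (g (PySem.List.pyGetD Ec k []))) E
        = (E.take n).map g ++ E.drop n := by
  intro n
  induction n with
  | zero =>
      intro E _
      rw [show ((0 : Nat) : Int) = (0 : Int) from rfl, PySem.List.pyRange_one_eq_nil (by norm_num)]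
      simp
  | succ n ihn =>
      intro E h
      have hn : n < E.length := by omega
      rw [show ((n + 1 : Nat) : Int) = ((n : Nat) : Int) + 1 by push_cast; ring]
      rw [PySem.List.pyRange_one_succ_right (by positivity)]
      rw [List.foldl_append, ihn E (by omega), List.foldl_cons, List.foldl_nil]
      rw [PySem.List.pyGetD_natCast]
      rw [show ((n : Int)).toNat = n by omega]
      have hlen : ((E.take n).map g).length = n := by
        simp [List.length_take]; omega
      rw [List.drop_eq_getElem_cons hn]
      have hget : (((E.take n).map g) ++ E[n] :: E.drop (n + 1)).getD n [] = E[n] := by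
        rw [List.getD_eq_getElem?_getD, List.getElem?_append_right (by omega),
          hlen, Nat.sub_self, List.getElem?_cons_zero]
        rfl
      rw [hget, List.set_append, if_neg (by omega), hlen, Nat.sub_self, List.set_cons_zero]
      rw [List.take_succ_eq_append_getElem hn, List.map_append]
      simp

theorem pvFinalSort (n : Nat) (E : List (List (List Int))) (hn : n = E.length) :
    (PySem.List.pyRange 0 (n : Int) 1).foldl
      (fun Ec k => Ec.set k.toNat (PySem.List.sorted (PySem.List.pyGetD Ec k []) (fun x => x) false)) E
      = E.map (fun e => PySem.List.sorted e (fun x => x) false) := by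
  subst hn
  rw [pvFoldSet_map (fun e => PySem.List.sorted e (fun x => x) false) E.length E (le_refl _)]
  simp

theorem pvSortedLL_congr (xs ys : List (List Int)) (h : xs.Perm ys) :
    PySem.List.sorted xs (fun x => x) false = PySem.List.sorted ys (fun x => x) false := by
  have h1 := PySem.List.sorted_eq_sorted_of_perm (κ := List Int) xs ys (fun x => x)
    (fun a b hh => hh) h
  convert h1 using 2

-- ===== VERDICT (by name: the statement is the Claim_ definition above) =====
theorem old_simplicialChainGroups_spec : Claim_equal_old_simplicialChainGroups := by
  intro ms _ hpre
  unfold Spec_old_simplicialChainGroups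
  unfold old_simplicialChainGroups old_simplicialChainGroups_alt
  cases hmax : PySem.List.max? (ms.map (fun s => s.length)) (fun x => x) with
  | none => rfl
  | some maxdim =>
      simp only []
      have hK : ∀ Q ∈ ms, Q.length < maxdim + 2 := by
        intro Q hQ
        have := PySem.List.max?_isMax hmax Q.length (List.mem_map.2 ⟨Q, hQ, rfl⟩)
        omega
      have hE0get : ∀ k : Nat, (List.replicate (maxdim + 2) ([] : List (List Int))).getD k [] = [] := by
        intro k
        rw [List.getD_eq_getElem?_getD, List.getElem?_replicate]
        split <;> rfl
      have hE0nod : ∀ k : Nat, ((List.replicate (maxdim + 2) ([] : List (List Int))).getD k []).Nodup := by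
        intro k; rw [hE0get]; exact List.nodup_nil
      have hlenA : (pvLoopA ms (List.replicate (maxdim + 2) [])).length = maxdim + 2 := by
        rw [pvLoopA_length]; simp
      rw [pvFinalSort (maxdim + 2) (pvLoopA ms (List.replicate (maxdim + 2) [])) hlenA.symm]
      rw [show (PySem.Set.empty : List (List Int)) = [] from rfl]
      have hlenB : (ms.foldl
          (fun E Q =>
            if Q.length = 0 then E
            else
              let E1 := E.set Q.length (PySem.Set.add (E.getD Q.length []) Q)
              let subs := (PySem.List.sorted Q (fun x => x) false).foldl
                (fun subs x => PySem.Set.union subs (subs.map (fun s => s ++ [x])))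
                (PySem.Set.ofList [([] : List Int)])
              subs.foldl
                (fun E s =>
                  if s.length < Q.length then E.set s.length (PySem.Set.add (E.getD s.length []) s) else E)
                E1)
          (List.replicate (maxdim + 2) [])).length = maxdim + 2 := by
        rw [pvLoopB_length]; simp
      apply List.ext_getElem
      · rw [List.length_map, List.length_map, hlenA, hlenB]
      · intro i hi1 hi2
        rw [List.getElem_map, List.getElem_map]
        apply pvSortedLL_congr
        have hiA : i < (pvLoopA ms (List.replicate (maxdim + 2) [])).length := by
          simpa using hi1
        have hiB : i < (ms.foldl
            (fun E Q =>
              if Q.length = 0 then E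
              else
                let E1 := E.set Q.length (PySem.Set.add (E.getD Q.length []) Q)
                let subs := (PySem.List.sorted Q (fun x => x) false).foldl
                  (fun subs x => PySem.Set.union subs (subs.map (fun s => s ++ [x])))
                  (PySem.Set.ofList [([] : List Int)])
                subs.foldl
                  (fun E s =>
                    if s.length < Q.length then E.set s.length (PySem.Set.add (E.getD s.length []) s) else E)
                  E1)
            (List.replicate (maxdim + 2) [])).length := by
          simpa using hi2
        rw [← List.getD_eq_getElem (pvLoopA ms (List.replicate (maxdim + 2) [])) [] hiA]
        rw [← List.getD_eq_getElem _ [] hiB]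
        apply (List.perm_ext_iff_of_nodup
          (pvLoopA_nodup ms (List.replicate (maxdim + 2) []) hE0nod i)
          (pvLoopB_nodup ms (List.replicate (maxdim + 2) []) hE0nod i)).2
        intro S
        rw [pvLoopA_mem ms (List.replicate (maxdim + 2) []) (by simpa using hK) i S]
        rw [pvLoopB_mem ms (List.replicate (maxdim + 2) []) (by simpa using hK) i S]
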